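-- pv_equiv track=rewrite | github.com/0HOON/Algorithm_Study | 프로그래머스/lv3/92344. 파괴되지 않은 건물/파괴되지 않은 건물.py | solve
-- ===== SOURCE A (Python) =====
-- def solve(board, skill):
--     seed = [[0]*len(board[0]) for _ in range(len(board))]
--     for s in skill:
--         t, r1, c1, r2, c2, deg = s
--         if t==1: deg = -deg
--
--         seed[r1][c1] += deg
--         if c2+1 < len(board[0]):
--             seed[r1][c2+1] -= deg
--         if r2+1 < len(board):
--             seed[r2+1][c1] -= deg
--             if c2+1 < len(board[0]):
--                 seed[r2+1][c2+1] += deg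
--
--     for i in range(len(seed)):
--         for j in range(1, len(seed[0])):
--             seed[i][j] += seed[i][j-1]
--
--
--     for j in range(len(seed[0])):
--         for i in range(1, len(seed)):
--             seed[i][j] += seed[i-1][j]
--
--     ans = 0
--     for i in range(len(seed)):
--         for j in range(len(seed[0])):
--             ans += (seed[i][j] + board[i][j])>0
--
--     return ans
-- ===== SOURCE B (Python) =====
-- def solve(board, skill):
--     rows, cols = len(board), len(board[0])
--     ans = 0
--     for i in range(rows):
--         for j in range(cols):
--             total = board[i][j]
--             for t, r1, c1, r2, c2, deg in skill:
--                 if r1 <= i <= r2 and c1 <= j <= c2: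
--                     total += -deg if t == 1 else deg
--             ans += total > 0
--     return ans
-- ===== Notes on version B (the rewrite author's own statement) =====
-- stated objective: alternative
-- what changed: Replaced A's 2D difference-array marking plus two prefix-sum sweeps with a direct per-cell pass that sums, for every cell, the contributions of all skill rectangles containing it.
-- outside the precondition, e.g. on solve([[1, 1], [1, 1]], [[1, -1, 0, 0, 0, 10]]): A returns 4, B returns 3; on solve([[1], [1], [1]], [[0, 2, 0, 0, 0, 5]]): A returns 2, B returns 3; on solve([], []): A raises IndexError, B raises IndexError
import Mathlib
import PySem

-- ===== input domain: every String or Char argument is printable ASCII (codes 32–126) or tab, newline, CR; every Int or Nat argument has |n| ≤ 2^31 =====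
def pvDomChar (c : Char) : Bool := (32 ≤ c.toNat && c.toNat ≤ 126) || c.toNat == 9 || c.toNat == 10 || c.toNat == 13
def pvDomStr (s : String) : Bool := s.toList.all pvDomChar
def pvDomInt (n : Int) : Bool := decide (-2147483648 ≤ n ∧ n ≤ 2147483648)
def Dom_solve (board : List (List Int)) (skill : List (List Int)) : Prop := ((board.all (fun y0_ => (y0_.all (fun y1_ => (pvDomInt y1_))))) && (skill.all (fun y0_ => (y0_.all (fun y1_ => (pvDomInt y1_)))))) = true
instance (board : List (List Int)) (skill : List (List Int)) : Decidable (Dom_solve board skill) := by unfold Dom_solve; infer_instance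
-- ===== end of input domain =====

-- B replaces A's difference-array marking + two prefix-sum sweeps by a direct per-cell
-- summation over the skill rectangles (alternative algorithm, not claimed faster).

-- ===== PORT A =====
def updAdd (g : List (List Int)) (i j d : Int) : List (List Int) :=
  let ii := if i < 0 then i + g.length else i
  if 0 ≤ ii ∧ ii < g.length then
    g.modify ii.toNat (fun row =>
      let jj := if j < 0 then j + row.length else j
      if 0 ≤ jj ∧ jj < row.length then row.modify jj.toNat (· + d) else row)
  else g

-- the body of A's first loop (one skill s); a non-6-element s makes Python raise on unpack (outside Pre_solve)
def applyMark (rows cols : Nat) (g : List (List Int)) (s : List Int) : List (List Int) :=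
  match s with
  | [t, r1, c1, r2, c2, deg] =>
    let deg := if t = 1 then -deg else deg
    let g := updAdd g r1 c1 deg
    let g := if c2 + 1 < (cols : Int) then updAdd g r1 (c2 + 1) (-deg) else g
    if r2 + 1 < (rows : Int) then
      let g := updAdd g (r2 + 1) c1 (-deg)
      if c2 + 1 < (cols : Int) then updAdd g (r2 + 1) (c2 + 1) deg else g
    else g
  | _ => g

-- A's second loop: seed[i][j] += seed[i][j-1] for j = 1.. — a running prefix along each row
def prefRow : Int → List Int → List Int
  | _, [] => []
  | acc, x :: xs => (acc + x) :: prefRow (acc + x) xs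

def prefRowFull : List Int → List Int
  | [] => []
  | x :: xs => x :: prefRow x xs

def prefColsGo : List Int → List (List Int) → List (List Int)
  | _, [] => []
  | prev, r :: rs => (List.zipWith (· + ·) prev r) :: prefColsGo (List.zipWith (· + ·) prev r) rs

def prefColsFull : List (List Int) → List (List Int)
  | [] => []
  | r :: rs => r :: prefColsGo r rs

-- A's final loop: ans += (seed[i][j] + board[i][j]) > 0
def countPos (seed board : List (List Int)) : Int :=
  (seed.zip board).foldl (fun a p =>
    a + (p.1.zip p.2).foldl (fun a2 q => a2 + (if q.1 + q.2 > 0 then 1 else 0)) 0) 0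

def solve (board : List (List Int)) (skill : List (List Int)) : Int :=
  let rows := board.length
  let cols := (board.headD []).length
  let seed := skill.foldl (applyMark rows cols) (List.replicate rows (List.replicate cols 0))
  countPos (prefColsFull (seed.map prefRowFull)) board

-- ===== PORT B =====
-- total = board[i][j] plus each skill's contribution when its rectangle contains (i, j)
def cellTotal (board : List (List Int)) (skill : List (List Int)) (i j : Int) : Int :=
  skill.foldl (fun tot s =>
    match s with
    | [t, r1, c1, r2, c2, deg] =>
      if r1 ≤ i ∧ i ≤ r2 ∧ c1 ≤ j ∧ j ≤ c2 then tot + (if t = 1 then -deg else deg) else tot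
    | _ => tot)
    (PySem.List.pyGetD (PySem.List.pyGetD board i []) j 0)

def solve_alt (board : List (List Int)) (skill : List (List Int)) : Int :=
  let rows := board.length
  let cols := (board.headD []).length
  (PySem.List.pyRange 0 rows 1).foldl (fun a i =>
    (PySem.List.pyRange 0 cols 1).foldl (fun a j =>
      a + (if cellTotal board skill i j > 0 then 1 else 0)) a) 0

-- ===== PRECONDITION & SPEC =====
-- Pre_solve is the problem's natural domain: a nonempty board whose rows are at least as long
-- as row 0, and skills of exactly six entries [t,r1,c1,r2,c2,deg] describing a genuine
-- rectangle (0 <= r1 <= r2, 0 <= c1 <= c2) whose top-left corner is on the board. Outside it A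
-- raises (empty board, too-short rows, wrong skill arity, corner off the board), or — for
-- negative or inverted rectangle coordinates — A returns values produced by Python's
-- negative-index wraparound and by stray difference marks, accidents of the difference-array
-- encoding that no caller would specify; those corners are excluded.
def Pre_solve (board : List (List Int)) (skill : List (List Int)) : Prop :=
  board ≠ [] ∧
  (∀ row ∈ board, (board.headD []).length ≤ row.length) ∧
  ∀ s ∈ skill, s.length = 6 ∧
    0 ≤ s.getD 1 0 ∧ s.getD 1 0 ≤ s.getD 3 0 ∧ s.getD 1 0 < (board.length : Int) ∧
    0 ≤ s.getD 2 0 ∧ s.getD 2 0 ≤ s.getD 4 0 ∧ s.getD 2 0 < ((board.headD []).length : Int)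
instance (board : List (List Int)) (skill : List (List Int)) : Decidable (Pre_solve board skill) := by
  unfold Pre_solve; infer_instance

def pvWitness_solve : List (List Int) × List (List Int) := ([[1, 1], [1, 1]], [[1, 0, 0, 1, 1, 3]])

def Spec_solve (board : List (List Int)) (skill : List (List Int)) (out : Int) : Prop := out = solve_alt board skill
instance (board : List (List Int)) (skill : List (List Int)) (out : Int) : Decidable (Spec_solve board skill out) := by unfold Spec_solve; infer_instance

-- ===== CLAIM (what is proved, stated in full; the proofs are below) =====
def Claim_equal_solve : Prop := ∀ (board : List (List Int)) (skill : List (List Int)), Dom_solve board skill → Pre_solve board skill → Spec_solve board skill (solve board skill)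

-- ===== LEMMAS AND PROOFS =====

def gg (g : List (List Int)) (i j : Nat) : Int := (g.getD i []).getD j 0
def Shape (rows cols : Nat) (g : List (List Int)) : Prop :=
  g.length = rows ∧ ∀ r ∈ g, r.length = cols

lemma modify_shape (rows cols : Nat) (g : List (List Int)) (n : Nat) (f : List Int → List Int)
    (h : Shape rows cols g) (hf : ∀ row, row.length = cols → (f row).length = cols) :
    Shape rows cols (g.modify n f) := by
  obtain ⟨hlen, hrow⟩ := h
  refine ⟨by simpa using hlen, ?_⟩
  intro r hr
  rw [List.mem_iff_getElem?] at hr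
  obtain ⟨k, hk⟩ := hr
  rw [List.getElem?_modify] at hk
  cases hg : g[k]? with
  | none => rw [hg] at hk; simp at hk
  | some row =>
    rw [hg] at hk
    have hrl := hrow row (List.mem_of_getElem? hg)
    simp only [Option.map_eq_map, Option.map_some] at hk
    split at hk
    · cases hk; exact hf row hrl
    · cases hk; exact hrl

lemma updAdd_shape (rows cols : Nat) (g : List (List Int)) (i j d : Int)
    (h : Shape rows cols g) : Shape rows cols (updAdd g i j d) := by
  simp only [updAdd]
  split <;> split
  all_goals
    first
      | exact h
      | · apply modify_shape rows cols g _ _ h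
          intro row hrl
          split <;> split <;> simp [List.length_modify, hrl]

lemma gg_updAdd (rows cols : Nat) (g : List (List Int)) (r c d : Int)
    (h : Shape rows cols g) (hr0 : 0 ≤ r) (hr : r < rows) (hc0 : 0 ≤ c) (hc : c < cols)
    (i j : Nat) :
    gg (updAdd g r c d) i j = gg g i j + (if (i : Int) = r ∧ (j : Int) = c then d else 0) := by
  obtain ⟨hlen, hrow⟩ := h
  simp only [updAdd, gg, List.getD_eq_getElem?_getD]
  rw [if_neg (by omega : ¬ r < 0), if_pos (⟨by omega, by omega⟩ : (0:Int) ≤ r ∧ r < (g.length:Int)), List.getElem?_modify]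
  by_cases hi : r.toNat = i
  · subst hi
    have hglt : r.toNat < g.length := by omega
    rw [List.getElem?_eq_getElem hglt]
    have hrl := hrow _ (List.getElem_mem hglt)
    simp only [Option.map_eq_map, Option.map_some, Option.getD_some]
    rw [if_neg (by omega : ¬ c < 0), if_pos (⟨by omega, by omega⟩ : (0:Int) ≤ c ∧ c < ((g[r.toNat]).length:Int))]
    simp only [if_true]
    rw [List.getElem?_modify]
    by_cases hj : c.toNat = j
    · subst hj
      have hc2 : c.toNat < (g[r.toNat]).length := by omega
      rw [List.getElem?_eq_getElem hc2]
      simp only [Option.map_eq_map, Option.map_some, Option.getD_some]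
      rw [if_pos (⟨by omega, by omega⟩ : (r.toNat:Int) = r ∧ (c.toNat:Int) = c)]
      simp
    · simp only [Option.map_eq_map, if_neg hj, Option.map_id']
      rw [if_neg (by omega : ¬ ((r.toNat:Int) = r ∧ (j:Int) = c))]
      simp
  · simp only [Option.map_eq_map, if_neg hi, Option.map_id']
    rw [if_neg (by omega : ¬ ((i:Int) = r ∧ (j:Int) = c))]
    simp


def delta (rows cols : Nat) (s : List Int) (i j : Nat) : Int :=
  match s with
  | [t, r1, c1, r2, c2, deg] =>
    ((if (i : Int) = r1 then 1 else 0) - (if (i : Int) = r2 + 1 ∧ r2 + 1 < (rows : Int) then 1 else 0)) *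
    ((if (j : Int) = c1 then 1 else 0) - (if (j : Int) = c2 + 1 ∧ c2 + 1 < (cols : Int) then 1 else 0)) *
    (if t = 1 then -deg else deg)
  | _ => 0

lemma applyMark_shape (rows cols : Nat) (g : List (List Int)) (s : List Int)
    (h : Shape rows cols g) : Shape rows cols (applyMark rows cols g s) := by
  simp only [applyMark]
  split
  · split_ifs <;> (repeat first | exact h | apply updAdd_shape)
  · exact h

set_option maxHeartbeats 1000000 in
lemma gg_applyMark (rows cols : Nat) (g : List (List Int)) (t r1 c1 r2 c2 deg : Int)
    (h : Shape rows cols g)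
    (h1 : 0 ≤ r1) (h2 : r1 ≤ r2) (h3 : r1 < rows) (h4 : 0 ≤ c1) (h5 : c1 ≤ c2) (h6 : c1 < cols)
    (i j : Nat) :
    gg (applyMark rows cols g [t, r1, c1, r2, c2, deg]) i j
      = gg g i j + delta rows cols [t, r1, c1, r2, c2, deg] i j := by
  have S1 := updAdd_shape rows cols g r1 c1 (if t = 1 then -deg else deg) h
  simp only [applyMark]
  by_cases hB : c2 + 1 < (cols : Int) <;> by_cases hA : r2 + 1 < (rows : Int)
  · simp only [hA, hB, if_true]
    have S2 := updAdd_shape rows cols _ r1 (c2+1) (-(if t = 1 then -deg else deg)) S1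
    have S3 := updAdd_shape rows cols _ (r2+1) c1 (-(if t = 1 then -deg else deg)) S2
    rw [gg_updAdd rows cols _ _ _ _ S3 (by omega) hA (by omega) hB,
        gg_updAdd rows cols _ _ _ _ S2 (by omega) hA h4 (by omega),
        gg_updAdd rows cols _ _ _ _ S1 h1 (by omega) (by omega) hB,
        gg_updAdd rows cols _ _ _ _ h h1 (by omega) h4 (by omega)]
    simp only [delta]
    split_ifs <;> omega
  · simp only [hA, hB, if_true, if_false]
    have S2 := updAdd_shape rows cols _ r1 (c2+1) (-(if t = 1 then -deg else deg)) S1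
    rw [gg_updAdd rows cols _ _ _ _ S1 h1 (by omega) (by omega) hB,
        gg_updAdd rows cols _ _ _ _ h h1 (by omega) h4 (by omega)]
    simp only [delta]
    split_ifs <;> omega
  · simp only [hA, hB, if_true, if_false]
    have S3 := updAdd_shape rows cols _ (r2+1) c1 (-(if t = 1 then -deg else deg)) S1
    rw [gg_updAdd rows cols _ _ _ _ S1 (by omega) hA h4 (by omega),
        gg_updAdd rows cols _ _ _ _ h h1 (by omega) h4 (by omega)]
    simp only [delta]
    split_ifs <;> omega
  · rw [if_neg hA, if_neg hB]
    rw [gg_updAdd rows cols _ _ _ _ h h1 (by omega) h4 (by omega)]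
    simp only [delta]
    split_ifs <;> omega

def WfSkill (rows cols : Nat) (s : List Int) : Prop :=
  s.length = 6 ∧ 0 ≤ s.getD 1 0 ∧ s.getD 1 0 ≤ s.getD 3 0 ∧ s.getD 1 0 < (rows : Int) ∧
    0 ≤ s.getD 2 0 ∧ s.getD 2 0 ≤ s.getD 4 0 ∧ s.getD 2 0 < (cols : Int)

lemma len6_explode (s : List Int) (h : s.length = 6) :
    ∃ a b c d e f, s = [a, b, c, d, e, f] := by
  match s, h with
  | [a, b, c, d, e, f], _ => exact ⟨a, b, c, d, e, f, rfl⟩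

lemma gg_foldl_applyMark (rows cols : Nat) (skill : List (List Int)) (init : List (List Int))
    (hsh : Shape rows cols init) (hwf : ∀ s ∈ skill, WfSkill rows cols s) (i j : Nat) :
    gg (skill.foldl (applyMark rows cols) init) i j
      = gg init i j + (skill.map (fun s => delta rows cols s i j)).sum := by
  induction skill generalizing init with
  | nil => simp
  | cons s rest ih =>
    have hw := hwf s (by simp)
    obtain ⟨t, r1, c1, r2, c2, deg, rfl⟩ := len6_explode s hw.1
    obtain ⟨-, w1, w2, w3, w4, w5, w6⟩ := hw
    simp only [List.getD] at w1 w2 w3 w4 w5 w6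
    rw [List.foldl_cons, ih _ (applyMark_shape rows cols init _ hsh) (fun x hx => hwf x (by simp [hx]))]
    rw [gg_applyMark rows cols init t r1 c1 r2 c2 deg hsh w1 w2 w3 w4 w5 w6 i j]
    simp [add_assoc]

lemma foldl_applyMark_shape (rows cols : Nat) (skill : List (List Int)) (init : List (List Int))
    (hsh : Shape rows cols init) : Shape rows cols (skill.foldl (applyMark rows cols) init) := by
  induction skill generalizing init with
  | nil => exact hsh
  | cons s rest ih => exact ih _ (applyMark_shape rows cols init s hsh)


lemma prefRow_length (a : Int) (xs : List Int) : (prefRow a xs).length = xs.length := by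
  induction xs generalizing a with
  | nil => rfl
  | cons x xs ih => simp [prefRow, ih]

lemma prefRowFull_length (xs : List Int) : (prefRowFull xs).length = xs.length := by
  cases xs <;> simp [prefRowFull, prefRow_length]

lemma prefRow_getD (xs : List Int) (a : Int) (k : Nat) (hk : k < xs.length) :
    (prefRow a xs).getD k 0 = a + ∑ u ∈ Finset.range (k + 1), xs.getD u 0 := by
  induction xs generalizing a k with
  | nil => simp at hk
  | cons x xs ih =>
    cases k with
    | zero => simp [prefRow]
    | succ k =>
      rw [prefRow, List.getD_cons_succ, ih (a + x) k (by simpa using hk)]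
      rw [Finset.sum_range_succ' (fun u => (x :: xs).getD u 0)]
      simp [add_assoc, add_comm, add_left_comm]

lemma prefRowFull_getD (xs : List Int) (k : Nat) (hk : k < xs.length) :
    (prefRowFull xs).getD k 0 = ∑ u ∈ Finset.range (k + 1), xs.getD u 0 := by
  cases xs with
  | nil => simp at hk
  | cons x xs =>
    cases k with
    | zero => simp [prefRowFull]
    | succ k =>
      rw [prefRowFull, List.getD_cons_succ, prefRow_getD xs x k (by simpa using hk)]
      rw [Finset.sum_range_succ' (fun u => (x :: xs).getD u 0)]
      simp [add_comm]

lemma zipget (a b : List Int) (j : Nat) (ha : j < a.length) (hb : j < b.length) :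
    (List.zipWith (· + ·) a b).getD j 0 = a.getD j 0 + b.getD j 0 := by
  rw [List.getD_eq_getElem _ _ (by simp [List.length_zipWith]; omega),
      List.getD_eq_getElem _ _ ha, List.getD_eq_getElem _ _ hb, List.getElem_zipWith]

lemma zipWith_len (a b : List Int) (cols : Nat) (ha : a.length = cols) (hb : b.length = cols) :
    (List.zipWith (· + ·) a b).length = cols := by
  simp [List.length_zipWith, ha, hb]

lemma prefColsGo_getD (cols : Nat) (rs : List (List Int)) (prev : List Int)
    (hp : prev.length = cols) (hr : ∀ r ∈ rs, r.length = cols) (k j : Nat)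
    (hk : k < rs.length) (hj : j < cols) :
    ((prefColsGo prev rs).getD k []).getD j 0
      = prev.getD j 0 + ∑ t ∈ Finset.range (k + 1), ((rs.getD t []).getD j 0) := by
  induction rs generalizing prev k with
  | nil => simp at hk
  | cons r rs ih =>
    have hrl : r.length = cols := hr r (by simp)
    cases k with
    | zero =>
      simp only [prefColsGo, List.getD_cons_zero]
      rw [zipget prev r j (by omega) (by omega)]
      simp
    | succ k =>
      rw [prefColsGo, List.getD_cons_succ,
          ih (List.zipWith (· + ·) prev r) (zipWith_len prev r cols hp hrl)
            (fun x hx => hr x (by simp [hx])) k (by simpa using hk)]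
      rw [zipget prev r j (by omega) (by omega)]
      rw [Finset.sum_range_succ' (fun t => ((r :: rs).getD t []).getD j 0)]
      simp [add_assoc, add_comm, add_left_comm]

lemma gg_prefColsFull (rows cols : Nat) (g : List (List Int)) (hsh : Shape rows cols g)
    (i j : Nat) (hi : i < rows) (hj : j < cols) :
    gg (prefColsFull g) i j = ∑ t ∈ Finset.range (i + 1), gg g t j := by
  obtain ⟨hlen, hrow⟩ := hsh
  cases g with
  | nil => simp at hlen; omega
  | cons r rs =>
    cases i with
    | zero => simp [prefColsFull, gg]
    | succ i =>
      simp only [prefColsFull, gg, List.getD_cons_succ]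
      rw [prefColsGo_getD cols rs r (hrow r (by simp)) (fun x hx => hrow x (by simp [hx])) i j
            (by simp at hlen; omega) hj]
      rw [Finset.sum_range_succ' (fun t => ((r :: rs).getD t []).getD j 0)]
      simp [add_comm]

lemma gg_pipeline (rows cols : Nat) (g : List (List Int)) (hsh : Shape rows cols g)
    (i j : Nat) (hi : i < rows) (hj : j < cols) :
    gg (prefColsFull (g.map prefRowFull)) i j
      = ∑ t ∈ Finset.range (i + 1), ∑ u ∈ Finset.range (j + 1), gg g t u := by
  obtain ⟨hlen, hrow⟩ := hsh
  have hsh' : Shape rows cols (g.map prefRowFull) := by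
    refine ⟨by simpa using hlen, ?_⟩
    intro r hr
    obtain ⟨x, hx, rfl⟩ := List.mem_map.1 hr
    rw [prefRowFull_length]; exact hrow x hx
  rw [gg_prefColsFull rows cols _ hsh' i j hi hj]
  apply Finset.sum_congr rfl
  intro t ht
  have htl : t < g.length := by
    have := Finset.mem_range.1 ht; omega
  have hgr : (g.getD t []).length = cols := by
    rw [List.getD_eq_getElem _ _ htl]; exact hrow _ (List.getElem_mem htl)
  unfold gg
  have hmapD : (g.map prefRowFull).getD t [] = prefRowFull (g.getD t []) := by
    by_cases h : t < g.length
    · rw [List.getD_eq_getElem _ _ (by simpa using h), List.getElem_map, List.getD_eq_getElem _ _ h]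
    · rw [List.getD_eq_default _ _ (by simpa using Nat.le_of_not_lt h),
          List.getD_eq_default _ _ (by omega)]
      rfl
  rw [hmapD, prefRowFull_getD _ j (by omega)]

lemma sum_ind (r : Int) (hr : 0 ≤ r) (n : Nat) :
    (∑ t ∈ Finset.range n, (if (t : Int) = r then (1 : Int) else 0)) = if r < n then 1 else 0 := by
  induction n with
  | zero => simp; omega
  | succ n ih =>
    rw [Finset.sum_range_succ, ih]
    split_ifs <;> omega

def rectTerm (s : List Int) (i j : Int) : Int :=
  match s with
  | [t, r1, c1, r2, c2, deg] =>
    if r1 ≤ i ∧ i ≤ r2 ∧ c1 ≤ j ∧ j ≤ c2 then (if t = 1 then -deg else deg) else 0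
  | _ => 0

lemma telescope (rows cols : Nat) (t r1 c1 r2 c2 deg : Int)
    (h1 : 0 ≤ r1) (h2 : r1 ≤ r2) (h4 : 0 ≤ c1) (h5 : c1 ≤ c2)
    (i j : Nat) (hi : i < rows) (hj : j < cols) :
    (∑ a ∈ Finset.range (i + 1), ∑ b ∈ Finset.range (j + 1),
        delta rows cols [t, r1, c1, r2, c2, deg] a b)
      = rectTerm [t, r1, c1, r2, c2, deg] (i : Int) (j : Int) := by
  simp only [delta, rectTerm]
  have colsum : (∑ b ∈ Finset.range (j + 1),
      ((if (b : Int) = c1 then (1:Int) else 0) - (if (b : Int) = c2 + 1 ∧ c2 + 1 < (cols : Int) then 1 else 0)))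
      = (if c1 ≤ (j:Int) ∧ (j:Int) ≤ c2 then 1 else 0) := by
    rw [Finset.sum_sub_distrib, sum_ind c1 h4]
    by_cases hb : c2 + 1 < (cols : Int)
    · rw [Finset.sum_congr rfl (fun b _ => by simp [hb] :
          ∀ b ∈ Finset.range (j+1), (if (b : Int) = c2 + 1 ∧ c2 + 1 < (cols : Int) then (1:Int) else 0) = (if (b : Int) = c2 + 1 then 1 else 0)),
          sum_ind (c2+1) (by omega)]
      split_ifs <;> omega
    · rw [Finset.sum_congr rfl (fun b _ => by simp [hb] : ∀ b ∈ Finset.range (j+1), (if (b : Int) = c2 + 1 ∧ c2 + 1 < (cols : Int) then (1:Int) else 0) = 0)]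
      simp only [Finset.sum_const_zero]
      split_ifs <;> omega
  have rowsum : (∑ a ∈ Finset.range (i + 1),
      ((if (a : Int) = r1 then (1:Int) else 0) - (if (a : Int) = r2 + 1 ∧ r2 + 1 < (rows : Int) then 1 else 0)))
      = (if r1 ≤ (i:Int) ∧ (i:Int) ≤ r2 then 1 else 0) := by
    rw [Finset.sum_sub_distrib, sum_ind r1 h1]
    by_cases hb : r2 + 1 < (rows : Int)
    · rw [Finset.sum_congr rfl (fun b _ => by simp [hb] :
          ∀ b ∈ Finset.range (i+1), (if (b : Int) = r2 + 1 ∧ r2 + 1 < (rows : Int) then (1:Int) else 0) = (if (b : Int) = r2 + 1 then 1 else 0)),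
          sum_ind (r2+1) (by omega)]
      split_ifs <;> omega
    · rw [Finset.sum_congr rfl (fun b _ => by simp [hb] : ∀ b ∈ Finset.range (i+1), (if (b : Int) = r2 + 1 ∧ r2 + 1 < (rows : Int) then (1:Int) else 0) = 0)]
      simp only [Finset.sum_const_zero]
      split_ifs <;> omega
  calc (∑ a ∈ Finset.range (i + 1), ∑ b ∈ Finset.range (j + 1),
        ((if (a : Int) = r1 then (1:Int) else 0) - (if (a : Int) = r2 + 1 ∧ r2 + 1 < (rows : Int) then 1 else 0)) *
        ((if (b : Int) = c1 then (1:Int) else 0) - (if (b : Int) = c2 + 1 ∧ c2 + 1 < (cols : Int) then 1 else 0)) *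
        (if t = 1 then -deg else deg))
      = (∑ a ∈ Finset.range (i + 1),
        ((if (a : Int) = r1 then (1:Int) else 0) - (if (a : Int) = r2 + 1 ∧ r2 + 1 < (rows : Int) then 1 else 0))) *
        ((∑ b ∈ Finset.range (j + 1),
        ((if (b : Int) = c1 then (1:Int) else 0) - (if (b : Int) = c2 + 1 ∧ c2 + 1 < (cols : Int) then 1 else 0))) *
        (if t = 1 then -deg else deg)) := by
        rw [Finset.sum_congr rfl (fun a _ => by
          simp only [mul_assoc]
          rw [← Finset.mul_sum, ← Finset.sum_mul] :
          ∀ a ∈ Finset.range (i+1),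
            (∑ b ∈ Finset.range (j + 1),
              ((if (a : Int) = r1 then (1:Int) else 0) - (if (a : Int) = r2 + 1 ∧ r2 + 1 < (rows : Int) then 1 else 0)) *
              ((if (b : Int) = c1 then (1:Int) else 0) - (if (b : Int) = c2 + 1 ∧ c2 + 1 < (cols : Int) then 1 else 0)) *
              (if t = 1 then -deg else deg))
            = ((if (a : Int) = r1 then (1:Int) else 0) - (if (a : Int) = r2 + 1 ∧ r2 + 1 < (rows : Int) then 1 else 0)) *
              ((∑ b ∈ Finset.range (j + 1),
                ((if (b : Int) = c1 then (1:Int) else 0) - (if (b : Int) = c2 + 1 ∧ c2 + 1 < (cols : Int) then 1 else 0))) *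
                (if t = 1 then -deg else deg)))]
        rw [← Finset.sum_mul]
    _ = rectTerm [t, r1, c1, r2, c2, deg] (i : Int) (j : Int) := by
        rw [colsum, rowsum]
        simp only [rectTerm]
        split_ifs <;> omega

lemma sum_list_comm (l : List (List Int)) (F : List Int → Nat → Int) (n : Nat) :
    (∑ x ∈ Finset.range n, (l.map (fun s => F s x)).sum)
      = (l.map (fun s => ∑ x ∈ Finset.range n, F s x)).sum := by
  induction l with
  | nil => simp
  | cons s rest ih => simp [Finset.sum_add_distrib, ih]


lemma cellBody_eq (i j : Int) (tot : Int) (s : List Int) :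
    (match s with
      | [t, r1, c1, r2, c2, deg] =>
        if r1 ≤ i ∧ i ≤ r2 ∧ c1 ≤ j ∧ j ≤ c2 then tot + (if t = 1 then -deg else deg) else tot
      | _ => tot)
      = tot + rectTerm s i j := by
  rcases s with _|⟨a,s⟩; · simp [rectTerm]
  rcases s with _|⟨b,s⟩; · simp [rectTerm]
  rcases s with _|⟨c,s⟩; · simp [rectTerm]
  rcases s with _|⟨d,s⟩; · simp [rectTerm]
  rcases s with _|⟨e,s⟩; · simp [rectTerm]
  rcases s with _|⟨f,s⟩; · simp [rectTerm]
  rcases s with _|⟨g,s⟩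
  · simp only [rectTerm]
    split_ifs <;> ring
  · simp [rectTerm]

lemma cellTotal_eq (board : List (List Int)) (skill : List (List Int)) (i j : Int) :
    cellTotal board skill i j
      = PySem.List.pyGetD (PySem.List.pyGetD board i []) j 0
        + (skill.map (fun s => rectTerm s i j)).sum := by
  unfold cellTotal
  generalize (PySem.List.pyGetD (PySem.List.pyGetD board i []) j 0) = init
  induction skill generalizing init with
  | nil => simp
  | cons s rest ih =>
    rw [List.foldl_cons, cellBody_eq i j init s, ih]
    simp [add_assoc]

lemma zipsum {α β : Type} (f : α → β → Int) (d1 : α) (d2 : β) :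
    ∀ (cols : Nat) (xs : List α) (ys : List β), xs.length = cols → cols ≤ ys.length →
    ((xs.zip ys).map (fun q => f q.1 q.2)).sum
      = ∑ k ∈ Finset.range cols, f (xs.getD k d1) (ys.getD k d2) := by
  intro cols
  induction cols with
  | zero => intro xs ys h1 h2; rw [List.length_eq_zero_iff.1 h1]; simp
  | succ n ih =>
    intro xs ys h1 h2
    cases xs with
    | nil => simp at h1
    | cons x xs =>
      cases ys with
      | nil => simp at h2
      | cons y ys =>
        simp only [List.zip_cons_cons, List.map_cons, List.sum_cons]
        rw [ih xs ys (by simpa using h1) (by simpa using h2)]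
        rw [Finset.sum_range_succ' (fun k => f ((x :: xs).getD k d1) ((y :: ys).getD k d2))]
        simp [add_comm]

lemma foldl_pyRange_add (F : Int → Int) (n : Nat) (a : Int) :
    (PySem.List.pyRange 0 (n : Int) 1).foldl (fun acc x => acc + F x) a
      = a + ∑ k ∈ Finset.range n, F (k : Int) := by
  rw [PySem.List.pyRange_one]
  simp only [List.foldl_map]
  rw [PySem.List.foldl_add (g := fun k : Nat => F (0 + (k : Int)))]
  congr 1
  have : ((n : Int) - 0).toNat = n := by omega
  rw [this]
  rw [show ∀ m : Nat, ((List.range m).map (fun k : Nat => F (0 + (k:Int)))).sum = ∑ k ∈ Finset.range m, F (0 + (k:Int)) from fun m => rfl]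
  apply Finset.sum_congr rfl
  intro k _
  rw [zero_add]

lemma prefColsGo_length (prev : List Int) (rs : List (List Int)) :
    (prefColsGo prev rs).length = rs.length := by
  induction rs generalizing prev with
  | nil => rfl
  | cons r rs ih => simp [prefColsGo, ih]

lemma prefColsGo_rows (cols : Nat) (prev : List Int) (rs : List (List Int))
    (hp : prev.length = cols) (hr : ∀ r ∈ rs, r.length = cols) :
    ∀ r ∈ prefColsGo prev rs, r.length = cols := by
  induction rs generalizing prev with
  | nil => simp [prefColsGo]
  | cons r rs ih =>
    intro x hx
    simp only [prefColsGo, List.mem_cons] at hx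
    rcases hx with rfl | hx
    · exact zipWith_len _ _ _ hp (hr r (by simp))
    · exact ih (List.zipWith (· + ·) prev r) (zipWith_len _ _ _ hp (hr r (by simp)))
        (fun y hy => hr y (by simp [hy])) x hx

lemma prefColsFull_shape (rows cols : Nat) (g : List (List Int)) (h : Shape rows cols g) :
    Shape rows cols (prefColsFull g) := by
  obtain ⟨hlen, hrow⟩ := h
  cases g with
  | nil => exact ⟨hlen, by simp [prefColsFull]⟩
  | cons r rs =>
    refine ⟨by simp [prefColsFull, prefColsGo_length]; simpa using hlen, ?_⟩
    intro x hx
    simp only [prefColsFull, List.mem_cons] at hx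
    rcases hx with rfl | hx
    · exact hrow x (by simp)
    · exact prefColsGo_rows cols r rs (hrow r (by simp)) (fun y hy => hrow y (by simp [hy])) x hx

lemma map_prefRowFull_shape (rows cols : Nat) (g : List (List Int)) (h : Shape rows cols g) :
    Shape rows cols (g.map prefRowFull) := by
  refine ⟨by simpa using h.1, ?_⟩
  intro r hr
  obtain ⟨x, hx, rfl⟩ := List.mem_map.1 hr
  rw [prefRowFull_length]; exact h.2 x hx

lemma gg_init (rows cols t u : Nat) :
    gg (List.replicate rows (List.replicate cols (0:Int))) t u = 0 := by
  unfold gg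
  rw [List.getD_eq_getElem?_getD (l := List.replicate rows (List.replicate cols (0:Int))),
      List.getElem?_replicate]
  by_cases h : t < rows
  · rw [if_pos h]
    simp only [Option.getD_some]
    rw [List.getD_eq_getElem?_getD, List.getElem?_replicate]
    split_ifs <;> simp
  · rw [if_neg h]; simp

lemma percell (rows cols : Nat) (skill : List (List Int))
    (hwf : ∀ s ∈ skill, WfSkill rows cols s) (i j : Nat) (hi : i < rows) (hj : j < cols) :
    gg (prefColsFull (((skill.foldl (applyMark rows cols)
          (List.replicate rows (List.replicate cols 0)))).map prefRowFull)) i j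
      = (skill.map (fun s => rectTerm s (i : Int) (j : Int))).sum := by
  have hsh0 : Shape rows cols (List.replicate rows (List.replicate cols (0:Int))) := by
    refine ⟨by simp, ?_⟩
    intro r hr
    rw [List.eq_of_mem_replicate hr]; simp
  have hshS := foldl_applyMark_shape rows cols skill _ hsh0
  rw [gg_pipeline rows cols _ hshS i j hi hj]
  have hstep : ∀ t ∈ Finset.range (i+1), ∀ u ∈ Finset.range (j+1),
      gg (skill.foldl (applyMark rows cols) (List.replicate rows (List.replicate cols 0))) t u
        = (skill.map (fun s => delta rows cols s t u)).sum := by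
    intro t _ u _
    rw [gg_foldl_applyMark rows cols skill _ hsh0 hwf t u, gg_init]
    simp
  calc (∑ t ∈ Finset.range (i + 1), ∑ u ∈ Finset.range (j + 1),
        gg (skill.foldl (applyMark rows cols) (List.replicate rows (List.replicate cols 0))) t u)
      = ∑ t ∈ Finset.range (i + 1), ∑ u ∈ Finset.range (j + 1),
          (skill.map (fun s => delta rows cols s t u)).sum := by
        apply Finset.sum_congr rfl
        intro t ht
        exact Finset.sum_congr rfl (fun u hu => hstep t ht u hu)
    _ = ∑ t ∈ Finset.range (i + 1),
          (skill.map (fun s => ∑ u ∈ Finset.range (j + 1), delta rows cols s t u)).sum := by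
        exact Finset.sum_congr rfl (fun t _ => sum_list_comm skill _ (j+1))
    _ = (skill.map (fun s => ∑ t ∈ Finset.range (i + 1), ∑ u ∈ Finset.range (j + 1),
          delta rows cols s t u)).sum := sum_list_comm skill _ (i+1)
    _ = (skill.map (fun s => rectTerm s (i : Int) (j : Int))).sum := by
        congr 1
        apply List.map_congr_left
        intro s hs
        have hw := hwf s hs
        obtain ⟨t, r1, c1, r2, c2, deg, rfl⟩ := len6_explode s hw.1
        obtain ⟨-, w1, w2, w3, w4, w5, w6⟩ := hw
        simp only [List.getD] at w1 w2 w3 w4 w5 w6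
        exact telescope rows cols t r1 c1 r2 c2 deg w1 w2 w4 w5 i j hi hj


lemma countPos_eq_sum (S B : List (List Int)) :
    countPos S B = ((S.zip B).map (fun q =>
      ((q.1.zip q.2).map (fun p => if p.1 + p.2 > 0 then (1:Int) else 0)).sum)).sum := by
  unfold countPos
  rw [PySem.List.foldl_add (g := fun q : List Int × List Int =>
        (q.1.zip q.2).foldl (fun a2 p => a2 + (if p.1 + p.2 > 0 then 1 else 0)) 0)]
  simp only [PySem.List.foldl_add, zero_add]


lemma mainEq (board skill : List (List Int))
    (hrows : ∀ row ∈ board, (board.headD []).length ≤ row.length)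
    (hwf : ∀ s ∈ skill, WfSkill board.length (board.headD []).length s) :
    solve board skill = solve_alt board skill := by
  set rows := board.length with hrowsdef
  set cols := (board.headD []).length with hcolsdef
  have hsh0 : Shape rows cols (List.replicate rows (List.replicate cols (0:Int))) := by
    refine ⟨by simp, ?_⟩
    intro r hr
    rw [List.eq_of_mem_replicate hr]; simp
  have hshS : Shape rows cols (prefColsFull ((skill.foldl (applyMark rows cols)
      (List.replicate rows (List.replicate cols 0))).map prefRowFull)) :=
    prefColsFull_shape rows cols _ (map_prefRowFull_shape rows cols _
      (foldl_applyMark_shape rows cols skill _ hsh0))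
  set S := prefColsFull ((skill.foldl (applyMark rows cols)
      (List.replicate rows (List.replicate cols 0))).map prefRowFull) with hSdef
  have hSlen : S.length = rows := hshS.1
  show countPos S board = solve_alt board skill
  rw [countPos_eq_sum]
  rw [zipsum (fun sr br => ((sr.zip br).map (fun p => if p.1 + p.2 > 0 then (1:Int) else 0)).sum)
        [] [] rows S board hshS.1 (le_of_eq rfl)]
  have hinner : ∀ k ∈ Finset.range rows,
      ((((S.getD k []).zip (board.getD k [])).map (fun p => if p.1 + p.2 > 0 then (1:Int) else 0)).sum)
        = ∑ j ∈ Finset.range cols,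
            (if (S.getD k []).getD j 0 + (board.getD k []).getD j 0 > 0 then (1:Int) else 0) := by
    intro k hk
    have hk' : k < rows := Finset.mem_range.1 hk
    have h1 : (S.getD k []).length = cols := by
      rw [List.getD_eq_getElem _ _ (by omega : k < S.length)]
      exact hshS.2 _ (List.getElem_mem _)
    have h2 : cols ≤ (board.getD k []).length := by
      rw [List.getD_eq_getElem _ _ (by omega : k < board.length)]
      exact hrows _ (List.getElem_mem _)
    exact zipsum (fun a b => if a + b > 0 then (1:Int) else 0) 0 0 cols _ _ h1 h2
  rw [Finset.sum_congr rfl hinner]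
  show _ = (PySem.List.pyRange 0 (rows : Int) 1).foldl (fun a i =>
    (PySem.List.pyRange 0 (cols : Int) 1).foldl (fun a j =>
      a + (if cellTotal board skill i j > 0 then 1 else 0)) a) 0
  simp only [foldl_pyRange_add, zero_add]
  apply Finset.sum_congr rfl
  intro i hi
  apply Finset.sum_congr rfl
  intro j hj
  have hi' : i < rows := Finset.mem_range.1 hi
  have hj' : j < cols := Finset.mem_range.1 hj
  rw [cellTotal_eq]
  simp only [PySem.List.pyGetD_natCast]
  have hP : (S.getD i []).getD j 0 = (skill.map (fun s => rectTerm s (i : Int) (j : Int))).sum :=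
    percell rows cols skill hwf i j hi' hj'
  rw [hP, add_comm]


-- ===== VERDICT (by name: the statement is the Claim_ definition above) =====
theorem solve_spec : Claim_equal_solve := by
  intro board skill _ hpre
  unfold Spec_solve
  exact mainEq board skill hpre.2.1 hpre.2.2
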